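-- pv_equiv track=rewrite | github.com/LoolzMe/surface-dynamics | surface_dynamics/topology/chord_diagrams.py | ch_test
-- ===== SOURCE A (Python) =====
-- def ch_test(t):
--     """
--     t is a tuple of numbers 1,2,...,m; each number appears exactly once.
--     ch_test(t) returns True if t is an admissible tuple: if i< j then
--     the first appearance of i should preceed the first appearance of j.
--     """
--     j =0
--     for i in t:
--         if i > j:
--             if i == j+1:
--                 j = i
--             else:
--                 return False
--     return True
-- ===== SOURCE B (Python) =====
-- def ch_test(t):
--     # Scan once building the prefix-maxima sequence (seeded with 0), then
--     # check that it never jumps by more than 1 between adjacent entries.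
--     prefix = [0]
--     for x in t:
--         prefix.append(max(prefix[-1], x))
--     return all(b <= a + 1 for a, b in zip(prefix, prefix[1:]))
-- ===== Notes on version B (the rewrite author's own statement) =====
-- stated objective: alternative
-- what changed: Replaces A's branch-and-early-return loop tracking the running max with a branch-free prefix-maxima scan followed by a deferred pairwise 'step <= 1' check over adjacent scan entries.
import Mathlib
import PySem

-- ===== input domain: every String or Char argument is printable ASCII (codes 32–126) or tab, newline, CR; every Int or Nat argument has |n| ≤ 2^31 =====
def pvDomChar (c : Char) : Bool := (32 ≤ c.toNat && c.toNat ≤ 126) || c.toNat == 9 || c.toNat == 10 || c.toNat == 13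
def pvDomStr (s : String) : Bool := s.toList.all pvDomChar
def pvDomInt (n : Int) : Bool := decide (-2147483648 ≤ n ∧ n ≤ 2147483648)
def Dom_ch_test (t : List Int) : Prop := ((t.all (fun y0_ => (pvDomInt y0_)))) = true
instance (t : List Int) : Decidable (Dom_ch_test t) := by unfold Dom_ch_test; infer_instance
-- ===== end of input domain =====

-- B replaces A's branch-and-early-return running-max loop with a branch-free
-- prefix-maxima scan plus a deferred pairwise "step ≤ 1" check (objective: alternative).

-- ===== PORT A =====
-- A's loop: j is the running max; early return False when a new max is not j+1.
def chGoA : List Int → Int → Bool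
  | [], _ => true
  | i :: rest, j =>
    if i > j then
      (if i = j + 1 then chGoA rest i else false)
    else chGoA rest j

def ch_test (t : List Int) : Bool := chGoA t 0

-- ===== PORT B =====
-- Source B's loop: prefix.append(max(prefix[-1], x)); acc is the list built so far, r = prefix[-1].
def chScanB : List Int → List Int → Int → List Int
  | [], acc, _ => acc
  | x :: rest, acc, r => chScanB rest (acc ++ [max r x]) (max r x)

def ch_test_alt (t : List Int) : Bool :=
  let p := chScanB t [0] 0
  ((p.zip p.tail).all (fun ab => decide (ab.2 ≤ ab.1 + 1)))

-- ===== PRECONDITION & SPEC =====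
def Spec_ch_test (t : List Int) (out : Bool) : Prop := out = ch_test_alt t
instance (t : List Int) (out : Bool) : Decidable (Spec_ch_test t out) := by unfold Spec_ch_test; infer_instance

-- ===== CLAIM (what is proved, stated in full; the proofs are below) =====
def Claim_equal_ch_test : Prop := ∀ (t : List Int), Dom_ch_test t → Spec_ch_test t (ch_test t)

-- ===== LEMMAS AND PROOFS =====

-- pure scan: prefix maxima starting from r (without the seed)
def chScanPure : List Int → Int → List Int
  | [], _ => []
  | x :: rest, r => max r x :: chScanPure rest (max r x)

theorem chScanB_eq (t : List Int) : ∀ (acc : List Int) (r : Int),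
    chScanB t acc r = acc ++ chScanPure t r := by
  induction t with
  | nil => intro acc r; simp [chScanB, chScanPure]
  | cons x rest ih => intro acc r; simp [chScanB, chScanPure, ih]

-- adjacent-pair check written as a recursion
def chOk : Int → List Int → Bool
  | _, [] => true
  | j, a :: l => (decide (a ≤ j + 1)) && chOk a l

theorem zip_all_eq_chOk (l : List Int) : ∀ (j : Int),
    (((j :: l).zip l).all (fun ab => decide (ab.2 ≤ ab.1 + 1))) = chOk j l := by
  induction l with
  | nil => intro j; simp [chOk]
  | cons a l ih => intro j; simp [chOk, ih a]

theorem chGoA_eq_chOk (t : List Int) : ∀ (j : Int),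
    chGoA t j = chOk j (chScanPure t j) := by
  induction t with
  | nil => intro j; simp [chGoA, chScanPure, chOk]
  | cons x rest ih =>
    intro j
    simp only [chGoA, chScanPure, chOk]
    by_cases hx : x > j
    · have hmax : max j x = x := by omega
      by_cases he : x = j + 1
      · subst he; simp [hmax, ih]
      · have : ¬ (x ≤ j + 1) := by omega
        simp [hx, he, hmax, this]
    · have hmax : max j x = j := by omega
      have : j ≤ j + 1 := by omega
      simp [hx, hmax, this, ih j]

-- ===== VERDICT (by name: the statement is the Claim_ definition above) =====
theorem ch_test_spec : Claim_equal_ch_test := by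
  intro t _
  unfold Spec_ch_test ch_test ch_test_alt
  rw [chScanB_eq]
  simp only [List.singleton_append, List.tail_cons]
  rw [zip_all_eq_chOk, chGoA_eq_chOk]
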